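-- pv_equiv track=rewrite | github.com/apetri/GoogleJam | src/RockPaperScissors/rps.py | first_lineup
-- ===== SOURCE A (Python) =====
-- wins_over = dict([("R","S"),("P","R"),("S","P")])
--
-- def construct_lineup(N,start,count):
--
-- 	#Base case, there's only 1 player
-- 	if N==0:
-- 		return start
--
-- 	#Must win again this candidate
-- 	candidate = wins_over[start]
-- 	count[candidate] += 1
--
-- 	#Merge
-- 	left = construct_lineup(N-1,start,count)
-- 	right = construct_lineup(N-1,candidate,count)
-- 	if left<right:
-- 		return left + right
-- 	else:
-- 		return right + left
--
-- def first_lineup(N,R,P,S):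
--
-- 	first = None
--
-- 	for start in "RPS":
--
-- 		#Keep track on the number of players
-- 		count = dict([("R",0),("P",0),("S",0)])
-- 		count[start] = 1
--
-- 		#Construct the proposed lineup and see if we can accept it
-- 		proposed = construct_lineup(N,start,count)
-- 		if (count["R"]!=R) or (count["P"]!=P) or (count["S"]!=S):
-- 			continue
--
-- 		if first is None:
-- 			first = proposed
-- 			continue
--
-- 		if proposed<first:
-- 			first = proposed
--
-- 	if first is None:
-- 		return "IMPOSSIBLE"
--
-- 	return first
-- ===== SOURCE B (Python) =====
-- wins_over = dict([("R","S"),("P","R"),("S","P")])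
--
-- def first_lineup(N,R,P,S):
--     # bottom-up DP: cur[x] = lexicographically built lineup whose winner is x
--     cur = {"R": "R", "P": "P", "S": "S"}
--     for _ in range(N):
--         nxt = {}
--         for x in "RPS":
--             a, b = cur[x], cur[wins_over[x]]
--             nxt[x] = a + b if a < b else b + a
--         cur = nxt
--     candidates = []
--     for start in "RPS":
--         lineup = cur[start]
--         cnt = {"R": 0, "P": 0, "S": 0}
--         for ch in lineup:
--             cnt[ch] += 1
--         if (cnt["R"], cnt["P"], cnt["S"]) == (R, P, S):
--             candidates.append(lineup)
--     return min(candidates) if candidates else "IMPOSSIBLE"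
-- ===== Notes on version B (the rewrite author's own statement) =====
-- stated objective: alternative
-- what changed: Replaces A's top-down tree recursion (which rebuilds each sub-bracket lineup at every recursive call and threads a mutable count dict) by an iterative bottom-up DP keeping the three per-winner lineup strings, sharing sub-bracket results across levels, with letter counts taken from the finished string.
import Mathlib
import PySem

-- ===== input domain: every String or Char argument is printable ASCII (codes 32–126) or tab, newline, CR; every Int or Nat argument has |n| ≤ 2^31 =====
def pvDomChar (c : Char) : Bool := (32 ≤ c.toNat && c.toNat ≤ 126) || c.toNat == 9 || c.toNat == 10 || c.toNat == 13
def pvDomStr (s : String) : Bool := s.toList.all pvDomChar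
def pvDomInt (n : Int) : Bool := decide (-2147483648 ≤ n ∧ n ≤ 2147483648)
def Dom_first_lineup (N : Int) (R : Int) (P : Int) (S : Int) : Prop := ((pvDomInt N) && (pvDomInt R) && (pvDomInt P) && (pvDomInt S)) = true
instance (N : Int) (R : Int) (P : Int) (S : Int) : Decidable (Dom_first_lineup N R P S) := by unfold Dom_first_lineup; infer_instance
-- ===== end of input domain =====

-- B replaces A's tree recursion over the bracket by an iterative bottom-up table of the three
-- per-winner lineups with post-hoc letter counting (objective: alternative decomposition).

-- ===== PORT A =====
-- wins_over = dict([("R","S"),("P","R"),("S","P")]); 1-char Python strings are ported as Char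
def pvWins : PySem.Dict Char Char := PySem.Dict.ofList [('R','S'),('P','R'),('S','P')]

-- construct_lineup(N,start,count): the count dict is threaded through in state-passing style
def pvConstruct : Nat → Char → PySem.Dict Char Int → List Char × PySem.Dict Char Int
  | 0, start, count => ([start], count)
  | n+1, start, count =>
      let candidate := pvWins.getD start ' '
      let count1 := count.modify candidate 0 (· + 1)
      let l := pvConstruct n start count1
      let r := pvConstruct n candidate l.2
      if l.1 < r.1 then (l.1 ++ r.1, r.2) else (r.1 ++ l.1, r.2)

def first_lineup (N : Int) (R : Int) (P : Int) (S : Int) : String :=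
  let first : Option (List Char) :=
    ['R','P','S'].foldl (fun first start =>
      let count := (PySem.Dict.ofList [('R',(0:Int)),('P',0),('S',0)]).insert start 1
      let res := pvConstruct N.toNat start count
      if res.2.getD 'R' 0 ≠ R ∨ res.2.getD 'P' 0 ≠ P ∨ res.2.getD 'S' 0 ≠ S then first
      else match first with
        | none => some res.1
        | some f => if res.1 < f then some res.1 else some f) none
  match first with
  | none => "IMPOSSIBLE"
  | some f => String.ofList f

-- ===== PORT B =====
def pvMerge (a b : List Char) : List Char := if a < b then a ++ b else b ++ a

def pvStep : List Char × List Char × List Char → List Char × List Char × List Char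
  | (r, p, s) => (pvMerge r s, pvMerge p r, pvMerge s p)

def pvIter : Nat → List Char × List Char × List Char → List Char × List Char × List Char
  | 0, c => c
  | n+1, c => pvIter n (pvStep c)

-- cnt = {"R":0,"P":0,"S":0}; for ch in lineup: cnt[ch] += 1
def pvCounts (s : List Char) : PySem.Dict Char Int :=
  s.foldl (fun d x => d.modify x 0 (· + 1)) (PySem.Dict.ofList [('R',(0:Int)),('P',0),('S',0)])

def first_lineup_alt (N : Int) (R : Int) (P : Int) (S : Int) : String :=
  let cur := pvIter N.toNat (['R'], ['P'], ['S'])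
  let candidates :=
    [cur.1, cur.2.1, cur.2.2].filter (fun s =>
      let cnt := pvCounts s
      (cnt.getD 'R' 0, cnt.getD 'P' 0, cnt.getD 'S' 0) = (R, P, S))
  match PySem.List.min? candidates (fun x => x) with
  | some m => String.ofList m
  | none => "IMPOSSIBLE"

-- ===== PRECONDITION & SPEC =====
-- A recurses on N-1 until N == 0, so any negative N never terminates (RecursionError)
def Pre_first_lineup (N : Int) (R : Int) (P : Int) (S : Int) : Prop := 0 ≤ N
instance (N : Int) (R : Int) (P : Int) (S : Int) : Decidable (Pre_first_lineup N R P S) := by unfold Pre_first_lineup; infer_instance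
def pvWitness_first_lineup : Int × Int × Int × Int := (2, 1, 1, 2)

def Spec_first_lineup (N : Int) (R : Int) (P : Int) (S : Int) (out : String) : Prop := out = first_lineup_alt N R P S
instance (N : Int) (R : Int) (P : Int) (S : Int) (out : String) : Decidable (Spec_first_lineup N R P S out) := by unfold Spec_first_lineup; infer_instance

-- ===== CLAIM (what is proved, stated in full; the proofs are below) =====
def Claim_equal_first_lineup : Prop := ∀ (N : Int) (R : Int) (P : Int) (S : Int), Dom_first_lineup N R P S → Pre_first_lineup N R P S → Spec_first_lineup N R P S (first_lineup N R P S)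

-- ===== LEMMAS AND PROOFS =====

-- the common recurrence: pvG n x is the lineup of the depth-n bracket whose winner is x
def pvG : Nat → Char → List Char
  | 0, x => [x]
  | n+1, x => pvMerge (pvG n x) (pvG n (pvWins.getD x ' '))

-- A's per-start acceptance test, expressed on pvG
def pvOK (n : Nat) (R P S : Int) (x : Char) : Bool :=
  decide ((((pvG n x).count 'R' : Int) = R) ∧ (((pvG n x).count 'P' : Int) = P) ∧ (((pvG n x).count 'S' : Int) = S))

-- A's running-minimum accumulator, abstracted over (lineup, accepted) pairs
def pvSelF (first : Option (List Char)) (p : List Char × Bool) : Option (List Char) :=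
  if p.2 then
    (match first with
      | none => some p.1
      | some f => if p.1 < f then some p.1 else some f)
  else first

theorem pvConstruct_fst (n : Nat) (start : Char) (count : PySem.Dict Char Int) :
    (pvConstruct n start count).1 = pvG n start := by
  induction n generalizing start count with
  | zero => rfl
  | succ n ih =>
      simp only [pvConstruct, pvG, pvMerge, ih]
      split <;> rfl

theorem pvConstruct_snd (n : Nat) (start : Char) (count : PySem.Dict Char Int) (c : Char) :
    (pvConstruct n start count).2.getD c 0 =
      count.getD c 0 + ((pvG n start).count c : Int) - (if c = start then 1 else 0) := by
  induction n generalizing start count with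
  | zero =>
      by_cases h : c = start
      · subst h; simp [pvConstruct, pvG]
      · simp [pvConstruct, pvG, List.count_cons, h, Ne.symm h]
  | succ n ih =>
      have hsplit : (pvConstruct (n+1) start count).2
          = (pvConstruct n (pvWins.getD start ' ')
              (pvConstruct n start (count.modify (pvWins.getD start ' ') 0 (· + 1))).2).2 := by
        simp only [pvConstruct]
        split <;> rfl
      rw [hsplit, ih, ih]
      have hmod : (count.modify (pvWins.getD start ' ') 0 (· + 1)).getD c 0
          = count.getD c 0 + (if c = pvWins.getD start ' ' then 1 else 0) := by
        by_cases h : c = pvWins.getD start ' '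
        · subst h; simp [PySem.Dict.getD_modify_self]
        · rw [PySem.Dict.getD_modify_of_ne count 0 (· + 1) h]; simp [h]
      have hcnt : ((pvG (n+1) start).count c : Int)
          = ((pvG n start).count c : Int) + ((pvG n (pvWins.getD start ' ')).count c : Int) := by
        simp only [pvG, pvMerge]
        split <;> simp [List.count_append] <;> push_cast <;> ring
      rw [hmod, hcnt]
      ring

theorem pvIter_g (n k : Nat) :
    pvIter n (pvG k 'R', pvG k 'P', pvG k 'S') = (pvG (n+k) 'R', pvG (n+k) 'P', pvG (n+k) 'S') := by
  induction n generalizing k with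
  | zero => simp [pvIter]
  | succ n ih =>
      have hstep : pvStep (pvG k 'R', pvG k 'P', pvG k 'S')
          = (pvG (k+1) 'R', pvG (k+1) 'P', pvG (k+1) 'S') := by
        simp only [pvStep, pvG]
        rfl
      have harith : n + (k+1) = n + 1 + k := by omega
      have := ih (k+1)
      rw [harith] at this
      simp only [pvIter, hstep, this]

theorem pvCounts_getD_R (s : List Char) : (pvCounts s).getD 'R' 0 = (s.count 'R' : Int) := by
  unfold pvCounts
  rw [PySem.Dict.getD_foldl_modify_add_one,
    show (PySem.Dict.ofList [('R',(0:Int)),('P',0),('S',0)]).getD 'R' 0 = 0 from by decide]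
  ring

theorem pvCounts_getD_P (s : List Char) : (pvCounts s).getD 'P' 0 = (s.count 'P' : Int) := by
  unfold pvCounts
  rw [PySem.Dict.getD_foldl_modify_add_one,
    show (PySem.Dict.ofList [('R',(0:Int)),('P',0),('S',0)]).getD 'P' 0 = 0 from by decide]
  ring

theorem pvCounts_getD_S (s : List Char) : (pvCounts s).getD 'S' 0 = (s.count 'S' : Int) := by
  unfold pvCounts
  rw [PySem.Dict.getD_foldl_modify_add_one,
    show (PySem.Dict.ofList [('R',(0:Int)),('P',0),('S',0)]).getD 'S' 0 = 0 from by decide]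
  ring

-- selection: A's running minimum over the accepted pairs = B's min? over the filtered lineups
theorem sel_eq (l : List (List Char × Bool)) (acc : Option (List Char)) :
    l.foldl pvSelF acc
      = ((l.filter (·.2)).map (·.1)).foldl
          (fun acc x => match acc with
            | none => some x
            | some m => if x < m then some x else some m) acc := by
  induction l generalizing acc with
  | nil => rfl
  | cons x t ih =>
      by_cases hx : x.2
      · have h1 : pvSelF acc x
            = (match acc with
                | none => some x.1
                | some m => if x.1 < m then some x.1 else some m) := by
          unfold pvSelF; rw [if_pos hx]
        rw [List.foldl_cons, h1, ih, List.filter_cons_of_pos hx, List.map_cons, List.foldl_cons]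
      · have h1 : pvSelF acc x = acc := by unfold pvSelF; rw [if_neg hx]
        rw [List.foldl_cons, h1, ih, List.filter_cons_of_neg (by simpa using hx)]

theorem sel_min? (l : List (List Char × Bool)) :
    l.foldl pvSelF none = PySem.List.min? ((l.filter (·.2)).map (·.1)) (fun x => x) := by
  rw [sel_eq]
  unfold PySem.List.min?
  congr 1
  funext acc x
  cases acc <;> rfl

-- ===== VERDICT (by name: the statement is the Claim_ definition above) =====
theorem pvFinalCount (n : Nat) (start : Char) (c : Char) (hc : c = 'R' ∨ c = 'P' ∨ c = 'S') :
    (pvConstruct n start ((PySem.Dict.ofList [('R',(0:Int)),('P',0),('S',0)]).insert start 1)).2.getD c 0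
      = ((pvG n start).count c : Int) := by
  rw [pvConstruct_snd]
  by_cases h : c = start
  · subst h; simp [PySem.Dict.getD_insert_self]
  · rw [PySem.Dict.getD_insert_of_ne _ _ _ h]
    rcases hc with hc|hc|hc <;> subst hc <;>
      rw [show (PySem.Dict.ofList [('R',(0:Int)),('P',0),('S',0)]).getD _ 0 = 0 from by decide] <;>
      simp [h]

theorem first_lineup_spec : Claim_equal_first_lineup := by
  unfold Claim_equal_first_lineup
  intro N R P S _ _
  unfold Spec_first_lineup
  simp only [first_lineup, first_lineup_alt]
  have hiter : pvIter N.toNat (['R'], ['P'], ['S'])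
      = (pvG N.toNat 'R', pvG N.toNat 'P', pvG N.toNat 'S') := by
    simpa [pvG] using pvIter_g N.toNat 0
  rw [hiter]
  have cR : ∀ start : Char,
      (pvConstruct N.toNat start ((PySem.Dict.ofList [('R',(0:Int)),('P',0),('S',0)]).insert start 1)).2.getD 'R' 0
        = ((pvG N.toNat start).count 'R' : Int) := fun s => pvFinalCount _ _ _ (by simp)
  have cP : ∀ start : Char,
      (pvConstruct N.toNat start ((PySem.Dict.ofList [('R',(0:Int)),('P',0),('S',0)]).insert start 1)).2.getD 'P' 0
        = ((pvG N.toNat start).count 'P' : Int) := fun s => pvFinalCount _ _ _ (by simp)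
  have cS : ∀ start : Char,
      (pvConstruct N.toNat start ((PySem.Dict.ofList [('R',(0:Int)),('P',0),('S',0)]).insert start 1)).2.getD 'S' 0
        = ((pvG N.toNat start).count 'S' : Int) := fun s => pvFinalCount _ _ _ (by simp)
  simp only [cR, cP, cS, pvConstruct_fst, pvCounts_getD_R, pvCounts_getD_P, pvCounts_getD_S]
  rw [PySem.List.foldl_congr_mem ['R','P','S'] _
      (fun acc start => pvSelF acc (pvG N.toNat start, pvOK N.toNat R P S start)) none
      (by
        intro acc x _
        by_cases hok : (((pvG N.toNat x).count 'R' : Int) = R)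
            ∧ (((pvG N.toNat x).count 'P' : Int) = P)
            ∧ (((pvG N.toNat x).count 'S' : Int) = S)
        · obtain ⟨h1, h2, h3⟩ := hok
          simp [pvSelF, pvOK, h1, h2, h3]
        · have hbad : ¬(((pvG N.toNat x).count 'R' : Int) = R)
              ∨ ¬(((pvG N.toNat x).count 'P' : Int) = P)
              ∨ ¬(((pvG N.toNat x).count 'S' : Int) = S) := by tauto
          rw [if_pos hbad]
          simp [pvSelF, pvOK, hok])]
  rw [← List.foldl_map (f := fun s : Char => (pvG N.toNat s, pvOK N.toNat R P S s)) (g := pvSelF)]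
  simp only [List.map_cons, List.map_nil]
  rw [sel_min?]
  have hfil :
      List.map (fun p : List Char × Bool => p.1)
        (List.filter (fun p : List Char × Bool => p.2)
          [(pvG N.toNat 'R', pvOK N.toNat R P S 'R'),
           (pvG N.toNat 'P', pvOK N.toNat R P S 'P'),
           (pvG N.toNat 'S', pvOK N.toNat R P S 'S')])
      = List.filter
          (fun s => decide ((((s.count 'R' : Int), (s.count 'P' : Int), (s.count 'S' : Int)) = (R, P, S))))
          [pvG N.toNat 'R', pvG N.toNat 'P', pvG N.toNat 'S'] := by
    have hp : ∀ s : List Char,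
        (decide ((((s.count 'R' : Int), (s.count 'P' : Int), (s.count 'S' : Int)) = (R, P, S))))
          = decide ((((s.count 'R' : Int)) = R) ∧ (((s.count 'P' : Int)) = P) ∧ (((s.count 'S' : Int)) = S)) := by
      intro s
      apply decide_eq_decide.mpr
      simp [Prod.ext_iff]
    simp only [List.filter, pvOK, hp]
    rcases hr : decide ((((pvG N.toNat 'R').count 'R' : Int)) = R ∧ (((pvG N.toNat 'R').count 'P' : Int)) = P ∧ (((pvG N.toNat 'R').count 'S' : Int)) = S) <;>
      rcases hp2 : decide ((((pvG N.toNat 'P').count 'R' : Int)) = R ∧ (((pvG N.toNat 'P').count 'P' : Int)) = P ∧ (((pvG N.toNat 'P').count 'S' : Int)) = S) <;>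
        rcases hs2 : decide ((((pvG N.toNat 'S').count 'R' : Int)) = R ∧ (((pvG N.toNat 'S').count 'P' : Int)) = P ∧ (((pvG N.toNat 'S').count 'S' : Int)) = S) <;>
          simp [hr, hp2, hs2]
  rw [hfil]
  cases PySem.List.min?
      (List.filter
        (fun s => decide ((((s.count 'R' : Int), (s.count 'P' : Int), (s.count 'S' : Int)) = (R, P, S))))
        [pvG N.toNat 'R', pvG N.toNat 'P', pvG N.toNat 'S'])
      (fun x => x) <;> rfl
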